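-- pv_equiv track=rewrite | github.com/MrBrantCode/unitest_baseline | mut_generate/mist_train_cf/cf_13405/solution.py | replace_next_char
-- ===== SOURCE A (Python) =====
-- def replace_next_char(string):
--     result = ""
--     for char in string:
--         if char.isalpha():
--             if char == 'z':
--                 result += 'a' if char.islower() else 'A'
--             elif char == 'Z':
--                 result += 'A' if char.isupper() else 'a'
--             else:
--                 next_char = chr(ord(char) + 1)
--                 result += next_char if char.islower() else chr(ord(char) + 1)
--         else:
--             result += char
--     return result
-- ===== SOURCE B (Python) =====
-- _SRC = "abcdefghijklmnopqrstuvwxyzABCDEFGHIJKLMNOPQRSTUVWXYZ"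
-- _DST = "bcdefghijklmnopqrstuvwxyzaBCDEFGHIJKLMNOPQRSTUVWXYZA"
-- _TABLE = str.maketrans(_SRC, _DST)
--
-- def replace_next_char(string):
--     return string.translate(_TABLE)
-- ===== Notes on version B (the rewrite author's own statement) =====
-- stated objective: idiomatic
-- what changed: Replaces the per-character branch cascade and string-concatenation loop with a precomputed str.maketrans translation table applied in a single str.translate call (non-letters pass through unmapped).
import Mathlib
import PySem

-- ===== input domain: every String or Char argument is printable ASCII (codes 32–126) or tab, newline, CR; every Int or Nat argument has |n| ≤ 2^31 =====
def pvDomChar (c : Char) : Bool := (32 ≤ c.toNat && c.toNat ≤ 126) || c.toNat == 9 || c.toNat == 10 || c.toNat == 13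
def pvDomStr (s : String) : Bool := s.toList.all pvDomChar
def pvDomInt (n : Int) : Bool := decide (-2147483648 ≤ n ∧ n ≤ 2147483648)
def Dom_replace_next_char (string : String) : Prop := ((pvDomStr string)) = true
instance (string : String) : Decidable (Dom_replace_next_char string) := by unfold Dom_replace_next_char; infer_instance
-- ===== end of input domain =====

-- B replaces A's per-character branch cascade with a precomputed translation table
-- applied in one map (idiomatic; non-letters pass through unmapped).

-- ===== PORT A =====
-- one loop iteration of A: the (one-char) string appended to result for char c
def pvStepA (c : Char) : List Char :=
  if PySem.Chars.isalpha c then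
    if c = 'z' then [if PySem.Chars.islower c then 'a' else 'A']
    else if c = 'Z' then [if PySem.Chars.isupper c then 'A' else 'a']
    else
      -- next_char = chr(ord(char) + 1); both branches of A's conditional compute chr(ord(char)+1)
      if PySem.Chars.islower c then [Char.ofNat (c.toNat + 1)] else [Char.ofNat (c.toNat + 1)]
  else [c]

def replace_next_char (string : String) : String :=
  String.mk (string.toList.foldl (fun acc c => acc ++ pvStepA c) [])

-- ===== PORT B =====
-- the maketrans table: each letter mapped to its successor, wrapping z→a / Z→A
def pvTable : List (Char × Char) :=
  List.zip "abcdefghijklmnopqrstuvwxyzABCDEFGHIJKLMNOPQRSTUVWXYZ".toList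
           "bcdefghijklmnopqrstuvwxyzaBCDEFGHIJKLMNOPQRSTUVWXYZA".toList

-- str.translate: look each character up in the table; unmapped characters pass through
def replace_next_char_alt (string : String) : String :=
  String.mk (string.toList.map (fun c => ((pvTable.lookup c).getD c)))

-- ===== PRECONDITION & SPEC =====
def Spec_replace_next_char (string : String) (out : String) : Prop := out = replace_next_char_alt string
instance (string : String) (out : String) : Decidable (Spec_replace_next_char string out) := by unfold Spec_replace_next_char; infer_instance

-- ===== CLAIM (what is proved, stated in full; the proofs are below) =====
def Claim_equal_replace_next_char : Prop := ∀ (string : String), Dom_replace_next_char string → Spec_replace_next_char string (replace_next_char string)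

-- ===== LEMMAS AND PROOFS =====
set_option maxRecDepth 4000 in
theorem pvStepA_eq_table (n : Nat) (hn : n < 128) (h : pvDomChar (Char.ofNat n) = true) :
    pvStepA (Char.ofNat n) = [((pvTable.lookup (Char.ofNat n)).getD (Char.ofNat n))] := by
  revert h
  revert hn
  revert n
  decide

theorem pvChar_ofNat_toNat (c : Char) (h : pvDomChar c = true) : Char.ofNat c.toNat = c := by
  apply Char.ofNat_toNat

theorem pvCharLt128 (c : Char) (h : pvDomChar c = true) : c.toNat < 128 := by
  simp [pvDomChar] at h
  omega

theorem pvStepA_singleton (c : Char) (h : pvDomChar c = true) :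
    pvStepA c = [((pvTable.lookup c).getD c)] := by
  have := pvStepA_eq_table c.toNat (pvCharLt128 c h)
  rw [pvChar_ofNat_toNat c h] at this
  exact this h

theorem pvFoldl_map (l : List Char) (acc : List Char) (h : l.all pvDomChar = true) :
    l.foldl (fun acc c => acc ++ pvStepA c) acc
      = acc ++ l.map (fun c => ((pvTable.lookup c).getD c)) := by
  induction l generalizing acc with
  | nil => simp
  | cons c t ih =>
    simp only [List.all_cons, Bool.and_eq_true] at h
    simp only [List.foldl_cons, List.map_cons]
    rw [ih _ h.2, pvStepA_singleton c h.1]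
    simp

-- ===== VERDICT (by name: the statement is the Claim_ definition above) =====
theorem replace_next_char_spec : Claim_equal_replace_next_char := by
  intro s hdom
  unfold Spec_replace_next_char replace_next_char replace_next_char_alt
  rw [pvFoldl_map _ _ hdom]
  simp
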